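-- pv_equiv track=rewrite | github.com/sehagler/nlp_pipeline | production/projects_lib/CCC19/py/ccc19_performance_data_manager_class.py | _performance_values
-- ===== SOURCE A (Python) =====
-- def _performance_values(input_list):
--     FN = len([ x for x in input_list if x == 'false negative' ])
--     FP = len([ x for x in input_list if x == 'false positive' ])
--     FP_plus_FN = \
--         len([ x for x in input_list if x == 'false positive + false negative' ])
--     TN = len([ x for x in input_list if x == 'true negative' ])
--     TP = len([ x for x in input_list if x == 'true positive' ])
--     return FN, FP, FP_plus_FN, TN, TP
-- ===== SOURCE B (Python) =====
-- def _performance_values(input_list):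
--     fn = fp = fpfn = tn = tp = 0
--     for x in input_list:
--         if x == 'false negative':
--             fn += 1
--         elif x == 'false positive':
--             fp += 1
--         elif x == 'false positive + false negative':
--             fpfn += 1
--         elif x == 'true negative':
--             tn += 1
--         elif x == 'true positive':
--             tp += 1
--     return fn, fp, fpfn, tn, tp
-- ===== Notes on version B (the rewrite author's own statement) =====
-- stated objective: alternative
-- what changed: Replaces five separate list-comprehension filtering passes (one per label) with a single explicit loop over the list that classifies each element once via an if/elif chain into five integer accumulators.
import Mathlib
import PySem

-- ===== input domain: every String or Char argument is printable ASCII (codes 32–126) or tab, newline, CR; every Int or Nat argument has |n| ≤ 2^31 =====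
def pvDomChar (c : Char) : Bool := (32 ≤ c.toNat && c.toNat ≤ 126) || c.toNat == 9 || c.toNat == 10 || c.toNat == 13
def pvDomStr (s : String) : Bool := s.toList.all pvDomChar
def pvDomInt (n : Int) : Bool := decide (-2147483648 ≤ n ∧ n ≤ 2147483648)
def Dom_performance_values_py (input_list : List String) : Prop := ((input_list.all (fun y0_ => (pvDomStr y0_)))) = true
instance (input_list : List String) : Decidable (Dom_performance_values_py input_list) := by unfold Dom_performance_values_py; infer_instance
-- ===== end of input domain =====

-- ===== PORT A =====
-- B: one explicit pass with an if/elif chain into five integer accumulators, instead of A's five filtering passes (objective: alternative).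
def performance_values_py (input_list : List String) : Int × Int × Int × Int × Int :=
  let FN : Int := ((input_list.filter (fun x => x == "false negative")).length : Int)
  let FP : Int := ((input_list.filter (fun x => x == "false positive")).length : Int)
  let FP_plus_FN : Int := ((input_list.filter (fun x => x == "false positive + false negative")).length : Int)
  let TN : Int := ((input_list.filter (fun x => x == "true negative")).length : Int)
  let TP : Int := ((input_list.filter (fun x => x == "true positive")).length : Int)
  (FN, FP, FP_plus_FN, TN, TP)

-- ===== PORT B =====
def pvStep (acc : Int × Int × Int × Int × Int) (x : String) : Int × Int × Int × Int × Int :=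
  let (fn, fp, fpfn, tn, tp) := acc
  if x == "false negative" then (fn + 1, fp, fpfn, tn, tp)
  else if x == "false positive" then (fn, fp + 1, fpfn, tn, tp)
  else if x == "false positive + false negative" then (fn, fp, fpfn + 1, tn, tp)
  else if x == "true negative" then (fn, fp, fpfn, tn + 1, tp)
  else if x == "true positive" then (fn, fp, fpfn, tn, tp + 1)
  else (fn, fp, fpfn, tn, tp)

def performance_values_py_alt (input_list : List String) : Int × Int × Int × Int × Int :=
  input_list.foldl pvStep (0, 0, 0, 0, 0)

-- ===== PRECONDITION & SPEC =====
def Spec_performance_values_py (input_list : List String) (out : Int × Int × Int × Int × Int) : Prop := out = performance_values_py_alt input_list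
instance (input_list : List String) (out : Int × Int × Int × Int × Int) : Decidable (Spec_performance_values_py input_list out) := by unfold Spec_performance_values_py; infer_instance

-- ===== CLAIM (what is proved, stated in full; the proofs are below) =====
def Claim_equal_performance_values_py : Prop := ∀ (input_list : List String), Dom_performance_values_py input_list → Spec_performance_values_py input_list (performance_values_py input_list)

-- ===== LEMMAS AND PROOFS =====
theorem pvFold_eq (xs : List String) (fn fp fpfn tn tp : Int) :
    xs.foldl pvStep (fn, fp, fpfn, tn, tp) =
      (fn + ((xs.filter (fun x => x == "false negative")).length : Int),
       fp + ((xs.filter (fun x => x == "false positive")).length : Int),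
       fpfn + ((xs.filter (fun x => x == "false positive + false negative")).length : Int),
       tn + ((xs.filter (fun x => x == "true negative")).length : Int),
       tp + ((xs.filter (fun x => x == "true positive")).length : Int)) := by
  induction xs generalizing fn fp fpfn tn tp with
  | nil => simp
  | cons y ys ih =>
    simp only [List.foldl_cons, pvStep, List.filter_cons]
    split_ifs with h1 h2 h3 h4 h5 <;>
      simp_all [ih] <;> push_cast <;> ring

-- ===== VERDICT (by name: the statement is the Claim_ definition above) =====
theorem performance_values_py_spec : Claim_equal_performance_values_py := by
  intro xs _
  unfold Spec_performance_values_py performance_values_py performance_values_py_alt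
  rw [pvFold_eq]
  simp
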